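-- pv_equiv track=rewrite | github.com/DeFiEye/BridgeEye | crosschain/lifinance.py | from_token_is_to_token
-- ===== SOURCE A (Python) =====
-- def from_token_is_to_token(token1, token2):
--     if token1 == token2:
--         return True
--     derivative_tokens = [["WETH", "WETH.E"], ["WBTC", "BTCB", "WBTC.E", "BTC"], ["USDC", "USDC.E", "FUSDC"],
--                          ["USDT", "USDT.E", "FUSDT"], ["DAI", "DAI.E", "XDAI"], ["AAVE", "AAVE.E"], ["BUSD", "BUSD.E"]]
--     for derivative_token in derivative_tokens:
--         if token1 in derivative_token and token2 in derivative_token: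
--             return True
--     return False
-- ===== SOURCE B (Python) =====
-- def from_token_is_to_token(token1, token2):
--     # Canonicalisation: map each token to its group's base name ('.E' suffix
--     # stripped when the stem is a base, plus a small alias map); two tokens are
--     # equivalent iff they are identical or both canonicalise to the same base.
--     bases = {"WETH", "WBTC", "USDC", "USDT", "DAI", "AAVE", "BUSD"}
--     aliases = {"BTCB": "WBTC", "BTC": "WBTC", "FUSDC": "USDC",
--                "FUSDT": "USDT", "XDAI": "DAI"}
--
--     def canon(t):
--         if t in aliases:
--             return aliases[t]
--         if t.endswith(".E") and t[:-2] in bases: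
--             return t[:-2]
--         return t
--
--     if token1 == token2:
--         return True
--     c1 = canon(token1)
--     return c1 == canon(token2) and c1 in bases
-- ===== Notes on version B (the rewrite author's own statement) =====
-- stated objective: alternative
-- what changed: Replaces A's scan over the list of derivative groups with token canonicalisation: each token is mapped to its group's base name by stripping a '.E' suffix when the stem is a base and resolving a small alias map, and the two canonical names are compared (equivalent iff identical or both canonicalise to the same base).
import Mathlib
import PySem

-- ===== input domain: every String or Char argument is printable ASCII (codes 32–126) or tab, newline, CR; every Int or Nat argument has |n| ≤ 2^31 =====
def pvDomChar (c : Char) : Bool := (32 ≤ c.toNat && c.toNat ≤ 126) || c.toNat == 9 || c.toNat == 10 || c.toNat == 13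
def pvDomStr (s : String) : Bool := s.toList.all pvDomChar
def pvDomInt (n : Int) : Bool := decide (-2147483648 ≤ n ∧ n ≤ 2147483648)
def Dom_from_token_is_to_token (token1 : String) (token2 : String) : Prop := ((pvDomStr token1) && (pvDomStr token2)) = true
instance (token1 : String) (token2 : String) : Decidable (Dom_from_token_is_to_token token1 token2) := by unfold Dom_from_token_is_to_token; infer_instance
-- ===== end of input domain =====

-- B replaces A's scan over the group table by token canonicalisation: strip a '.E'
-- suffix when the stem is a base name, resolve a small alias map, then compare the
-- two canonical base names (objective: alternative algorithm, same cost).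

-- ===== PORT A =====
-- the `for derivative_token in derivative_tokens:` loop with its early `return True`
def pvLoopA (t1 t2 : String) : List (List String) → Bool
  | [] => false
  | g :: rest => if g.contains t1 && g.contains t2 then true else pvLoopA t1 t2 rest

def from_token_is_to_token (token1 : String) (token2 : String) : Bool :=
  if token1 == token2 then true
  else
    let derivative_tokens : List (List String) :=
      [["WETH", "WETH.E"], ["WBTC", "BTCB", "WBTC.E", "BTC"], ["USDC", "USDC.E", "FUSDC"],
       ["USDT", "USDT.E", "FUSDT"], ["DAI", "DAI.E", "XDAI"], ["AAVE", "AAVE.E"], ["BUSD", "BUSD.E"]]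
    pvLoopA token1 token2 derivative_tokens

-- ===== PORT B =====
-- bases = {"WETH", "WBTC", "USDC", "USDT", "DAI", "AAVE", "BUSD"}  (a Python set)
def pvBases : PySem.Set String :=
  PySem.Set.ofList ["WETH", "WBTC", "USDC", "USDT", "DAI", "AAVE", "BUSD"]

-- aliases = {"BTCB": "WBTC", "BTC": "WBTC", "FUSDC": "USDC", "FUSDT": "USDT", "XDAI": "DAI"}
def pvAliases : PySem.Dict String String :=
  PySem.Dict.mk [("BTCB", "WBTC"), ("BTC", "WBTC"), ("FUSDC", "USDC"),
                 ("FUSDT", "USDT"), ("XDAI", "DAI")]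

-- def canon(t): the `t in aliases` guard plus `aliases[t]` is the option match
def pvCanon (t : String) : String :=
  match pvAliases.get? t with
  | some v => v
  | none =>
    if PySem.Str.endswith t ".E" && pvBases.contains (PySem.Str.slice t none (some (-2))) then
      PySem.Str.slice t none (some (-2))
    else t

def from_token_is_to_token_alt (token1 : String) (token2 : String) : Bool :=
  if token1 == token2 then true
  else
    let c1 := pvCanon token1
    c1 == pvCanon token2 && pvBases.contains c1

-- ===== PRECONDITION & SPEC =====
def Spec_from_token_is_to_token (token1 : String) (token2 : String) (out : Bool) : Prop := out = from_token_is_to_token_alt token1 token2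
instance (token1 : String) (token2 : String) (out : Bool) : Decidable (Spec_from_token_is_to_token token1 token2 out) := by unfold Spec_from_token_is_to_token; infer_instance

-- ===== CLAIM (what is proved, stated in full; the proofs are below) =====
def Claim_equal_from_token_is_to_token : Prop := ∀ (token1 : String) (token2 : String), Dom_from_token_is_to_token token1 token2 → Spec_from_token_is_to_token token1 token2 (from_token_is_to_token token1 token2)

-- ===== LEMMAS AND PROOFS =====

-- all tokens occurring in any group of A's table
def pvTokens : List String :=
  ["WETH", "WETH.E", "WBTC", "BTCB", "WBTC.E", "BTC", "USDC", "USDC.E", "FUSDC",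
   "USDT", "USDT.E", "FUSDT", "DAI", "DAI.E", "XDAI", "AAVE", "AAVE.E", "BUSD", "BUSD.E"]

-- a token outside the table is fixed by canon: it is no alias key, and if it ends in
-- '.E' with a base stem it would itself be one of the '.E' table tokens
theorem pvCanon_id (t : String) (h : t ∉ pvTokens) : pvCanon t = t := by
  simp only [pvTokens, List.mem_cons, List.not_mem_nil, or_false, not_or] at h
  obtain ⟨h1,h2,h3,h4,h5,h6,h7,h8,h9,h10,h11,h12,h13,h14,h15,h16,h17,h18,h19⟩ := h
  unfold pvCanon
  rw [show pvAliases.get? t = none by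
    simp [pvAliases, PySem.Dict.get?, Ne.symm h4, Ne.symm h6, Ne.symm h9, Ne.symm h12, Ne.symm h15]]
  simp only
  by_cases hb : (PySem.Str.endswith t ".E" && pvBases.contains (PySem.Str.slice t none (some (-2)))) = true
  · exfalso
    obtain ⟨he, hc⟩ : PySem.Str.endswith t ".E" = true ∧
        pvBases.contains (PySem.Str.slice t none (some (-2))) = true := by
      simpa using hb
    have hsuf : ['.','E'] <:+ t.toList := by
      rw [← PySem.Chars.endswith_iff]; simpa using he
    obtain ⟨l, hl⟩ := hsuf
    have hsl : (PySem.Str.slice t none (some (-2))).toList = l := by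
      simp only [Int.reduceNeg, PySem.Str.toList_slice, PySem.Chars.slice_eq_listSlice]
      rw [PySem.List.slice_to_neg_ofNat t.toList 2 (by omega), ← hl]
      simp
    have hmem : PySem.Str.slice t none (some (-2)) ∈
        ["WETH", "WBTC", "USDC", "USDT", "DAI", "AAVE", "BUSD"] := by
      simpa [pvBases, PySem.Set.ofList, List.contains_iff_mem] using hc
    have ht : t.toList = l ++ ['.','E'] := hl.symm
    simp only [List.mem_cons, List.not_mem_nil, or_false] at hmem
    rcases hmem with h'|h'|h'|h'|h'|h'|h' <;>
      [exact h2 (String.toList_inj.mp (by rw [ht, ← hsl, h']; decide));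
       exact h5 (String.toList_inj.mp (by rw [ht, ← hsl, h']; decide));
       exact h8 (String.toList_inj.mp (by rw [ht, ← hsl, h']; decide));
       exact h11 (String.toList_inj.mp (by rw [ht, ← hsl, h']; decide));
       exact h14 (String.toList_inj.mp (by rw [ht, ← hsl, h']; decide));
       exact h17 (String.toList_inj.mp (by rw [ht, ← hsl, h']; decide));
       exact h19 (String.toList_inj.mp (by rw [ht, ← hsl, h']; decide))]
  · rw [if_neg hb]

-- A ignores a left token outside the table: its loop never fires
theorem pv_notin_left_A (t1 t2 : String) (h : t1 ∉ pvTokens) :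
    from_token_is_to_token t1 t2 = (t1 == t2) := by
  simp only [pvTokens, List.mem_cons, List.not_mem_nil, or_false, not_or] at h
  obtain ⟨h1,h2,h3,h4,h5,h6,h7,h8,h9,h10,h11,h12,h13,h14,h15,h16,h17,h18,h19⟩ := h
  simp [from_token_is_to_token, pvLoopA, h1,h2,h3,h4,h5,h6,h7,h8,h9,h10,h11,h12,h13,h14,h15,h16,h17,h18,h19]
  by_cases h : t1 = t2 <;> simp [h]

-- …and so does B: canon fixes it and it is no base
theorem pv_notin_left_B (t1 t2 : String) (h : t1 ∉ pvTokens) :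
    from_token_is_to_token_alt t1 t2 = (t1 == t2) := by
  have hc := pvCanon_id t1 h
  simp only [pvTokens, List.mem_cons, List.not_mem_nil, or_false, not_or] at h
  obtain ⟨h1,h2,h3,h4,h5,h6,h7,h8,h9,h10,h11,h12,h13,h14,h15,h16,h17,h18,h19⟩ := h
  by_cases he : t1 = t2
  · simp [from_token_is_to_token_alt, he]
  · simp [from_token_is_to_token_alt, he, hc, pvBases, PySem.Set.ofList,
      h1, h3, h7, h10, h13, h16, h18]

-- A ignores a right token outside the table symmetrically
theorem pv_notin_right_A (t1 t2 : String) (h : t2 ∉ pvTokens) :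
    from_token_is_to_token t1 t2 = (t1 == t2) := by
  simp only [pvTokens, List.mem_cons, List.not_mem_nil, or_false, not_or] at h
  obtain ⟨h1,h2,h3,h4,h5,h6,h7,h8,h9,h10,h11,h12,h13,h14,h15,h16,h17,h18,h19⟩ := h
  simp [from_token_is_to_token, pvLoopA, h1,h2,h3,h4,h5,h6,h7,h8,h9,h10,h11,h12,h13,h14,h15,h16,h17,h18,h19]
  by_cases h : t1 = t2 <;> simp [h]

-- with a table token on the left and a non-table token on the right B is false too:
-- canon t1 stays inside the table, so it never equals t2, and canon t2 = t2
theorem pv_in_left_notin_right_B (t1 t2 : String) (m1 : t1 ∈ pvTokens)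
    (h : t2 ∉ pvTokens) : from_token_is_to_token_alt t1 t2 = (t1 == t2) := by
  have hsub : ∀ x ∈ pvTokens, pvCanon x ∈ pvTokens := by decide
  have he : t1 ≠ t2 := fun e => h (e ▸ m1)
  have hne2 : pvCanon t1 ≠ t2 := fun e => h (e ▸ hsub t1 m1)
  have g1 : (pvCanon t1 == t2) = false := beq_eq_false_iff_ne.mpr hne2
  have g2 : (t1 == t2) = false := beq_eq_false_iff_ne.mpr he
  simp [from_token_is_to_token_alt, pvCanon_id t2 h, g1, g2]

-- ===== VERDICT (by name: the statement is the Claim_ definition above) =====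
theorem from_token_is_to_token_spec : Claim_equal_from_token_is_to_token := by
  intro t1 t2 _
  unfold Spec_from_token_is_to_token
  by_cases m1 : t1 ∈ pvTokens
  · by_cases m2 : t2 ∈ pvTokens
    · fin_cases m1 <;> fin_cases m2 <;> decide
    · rw [pv_notin_right_A t1 t2 m2, pv_in_left_notin_right_B t1 t2 m1 m2]
  · rw [pv_notin_left_A t1 t2 m1, pv_notin_left_B t1 t2 m1]
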